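-- pv_equiv track=rewrite | github.com/Josephtr16/task-manager-ai-platform | ai-service/routes/dependency_graph.py | _depends_on
-- ===== SOURCE A (Python) =====
-- from typing import List, Optional, Dict
--
-- def _depends_on(start_id: str, target_id: str, dep_map: Dict[str, List[str]], visited=None) -> bool:
--     if visited is None:
--         visited = set()
--     if start_id in visited:
--         return False
--
--     visited.add(start_id)
--     for dep_id in dep_map.get(start_id, []):
--         if dep_id == target_id:
--             return True
--         if _depends_on(dep_id, target_id, dep_map, visited):
--             return True
--     return False
-- ===== SOURCE B (Python) =====
-- def _depends_on(start_id: str, target_id: str, dep_map, visited=None) -> bool: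
--     if visited is None:
--         visited = set()
--     stack = [start_id]
--     while stack:
--         node = stack.pop()
--         if node in visited:
--             continue
--         visited.add(node)
--         for dep_id in reversed(dep_map.get(node, [])):
--             if dep_id == target_id:
--                 return True
--             stack.append(dep_id)
--     return False
-- ===== Notes on version B (the rewrite author's own statement) =====
-- stated objective: alternative
-- what changed: Replaced the recursive DFS with an iterative DFS driven by an explicit stack (push reversed neighbours, pop, skip visited), with the target check done when a node's neighbour list is scanned instead of inside a recursive call chain.
import Mathlib
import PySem

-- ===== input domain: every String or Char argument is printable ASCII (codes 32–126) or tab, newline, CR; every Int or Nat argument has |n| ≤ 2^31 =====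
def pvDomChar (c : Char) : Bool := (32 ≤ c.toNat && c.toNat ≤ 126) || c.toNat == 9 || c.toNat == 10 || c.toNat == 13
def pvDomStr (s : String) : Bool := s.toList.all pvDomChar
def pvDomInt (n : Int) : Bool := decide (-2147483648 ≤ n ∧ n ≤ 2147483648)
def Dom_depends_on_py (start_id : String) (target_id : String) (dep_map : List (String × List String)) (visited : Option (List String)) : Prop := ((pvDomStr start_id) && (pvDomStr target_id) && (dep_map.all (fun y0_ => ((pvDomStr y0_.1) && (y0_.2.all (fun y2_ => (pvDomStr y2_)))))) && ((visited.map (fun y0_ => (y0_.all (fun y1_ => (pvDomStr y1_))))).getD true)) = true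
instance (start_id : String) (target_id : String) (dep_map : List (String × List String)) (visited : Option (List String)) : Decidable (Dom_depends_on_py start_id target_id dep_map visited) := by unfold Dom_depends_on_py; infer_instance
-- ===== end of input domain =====

-- B replaces A's recursive DFS by an iterative explicit-stack DFS (same return value; note both Pythons
-- mutate a caller-supplied `visited` set — the equivalence proved here is about the RETURN value only,
-- and on an early `True` the two leave different contents in `visited`).

-- Termination measure shared by both ports: number of key occurrences of dep_map not yet visited.
def pvKeysLeft (dep_map : List (String × List String)) (v : PySem.Set String) : Nat :=
  (dep_map.map Prod.fst).countP (fun k => !(PySem.Set.contains v k))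

-- membership in a set is preserved by add (used by the measure lemmas)
theorem pvContains_add_imp (v : PySem.Set String) (s x : String)
    (h : PySem.Set.contains v x = true) :
    PySem.Set.contains (PySem.Set.add v s) x = true :=
  (PySem.Set.contains_iff _ x).mpr ((PySem.Set.mem_add v s x).mpr (Or.inl ((PySem.Set.contains_iff v x).mp h)))

-- adding an element never increases the measure (cited by the ports' decreasing_by)
theorem pvKeysLeft_add_le (dm : List (String × List String)) (v : PySem.Set String) (s : String) :
    pvKeysLeft dm (PySem.Set.add v s) ≤ pvKeysLeft dm v := by
  apply List.countP_mono_left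
  intro k _ h
  simp only [Bool.not_eq_true'] at h ⊢
  by_contra hc
  rw [Bool.not_eq_false] at hc
  rw [pvContains_add_imp v s k hc] at h
  cases h

-- helper for the strict case
theorem pvCountP_lt {l : List String} {p q : String → Bool}
    (hmono : ∀ x, q x = true → p x = true) {s : String}
    (hs : s ∈ l) (hps : p s = true) (hqs : q s = false) :
    l.countP q < l.countP p := by
  induction l with
  | nil => cases hs
  | cons a l ih =>
    rw [List.countP_cons, List.countP_cons]
    have hle : l.countP q ≤ l.countP p := List.countP_mono_left (fun x _ h => hmono x h)
    have hh : (if q a = true then 1 else 0) ≤ (if p a = true then 1 else 0) := by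
      by_cases hq : q a = true
      · simp [hq, hmono a hq]
      · simp [hq]
    rcases List.mem_cons.mp hs with rfl | hs'
    · rw [if_pos hps, if_neg (by simp [hqs])]
      omega
    · have := ih hs'
      omega

-- adding an unvisited key strictly decreases the measure (cited by the ports' decreasing_by)
theorem pvKeysLeft_add_lt (dm : List (String × List String)) (v : PySem.Set String) (s : String)
    (h1 : s ∈ dm.map Prod.fst) (h2 : PySem.Set.contains v s = false) :
    pvKeysLeft dm (PySem.Set.add v s) < pvKeysLeft dm v := by
  refine pvCountP_lt ?_ h1 (by simp only [h2, Bool.not_false]) ?_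
  · intro x hx
    simp only [Bool.not_eq_true'] at hx ⊢
    by_contra hc
    rw [Bool.not_eq_false] at hc
    rw [pvContains_add_imp v s x hc] at hx
    cases hx
  · rw [Bool.not_eq_false']
    exact (PySem.Set.contains_iff _ s).mpr ((PySem.Set.mem_add v s s).mpr (Or.inr rfl))

-- a key absent from the dict yields the default (cited by the ports' decreasing_by)
theorem pvGetD_nil (dm : List (String × List String)) (k : String)
    (h : k ∉ dm.map Prod.fst) : (PySem.Dict.mk dm).getD k [] = [] := by
  apply PySem.Dict.getD_of_not_contains
  by_contra hc
  rw [Bool.not_eq_false] at hc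
  have hk := (PySem.Dict.contains_iff_mem_keys _ k).mp hc
  simp only [PySem.Dict.keys_mk] at hk
  exact h hk

-- ===== PORT A =====
-- A's `for dep_id in dep_map.get(start_id, [])` loop; the recursive call `_depends_on(dep_id, …, visited)`
-- is inlined as the callee's own body (its `start_id in visited` check followed by its loop), with the
-- mutated `visited` threaded through as the (measure-certified) second component.
def depends_on_loopA (target : String) (dm : List (String × List String)) :
    (ds : List String) → (v : PySem.Set String) →
    Bool × {w : PySem.Set String // pvKeysLeft dm w ≤ pvKeysLeft dm v}
  | [], v => (false, ⟨v, Nat.le.refl⟩)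
  | d :: ds, v =>
    if d == target then (true, ⟨v, Nat.le.refl⟩)
    else if hv : PySem.Set.contains v d = true then
      -- nested _depends_on returns False at once, visited unchanged
      depends_on_loopA target dm ds v
    else
      match depends_on_loopA target dm ((PySem.Dict.mk dm).getD d []) (PySem.Set.add v d) with
      | (true, w) => (true, ⟨w.1, le_trans w.2 (pvKeysLeft_add_le dm v d)⟩)
      | (false, w) =>
        match depends_on_loopA target dm ds w.1 with
        | (b, w') => (b, ⟨w'.1, le_trans w'.2 (le_trans w.2 (pvKeysLeft_add_le dm v d))⟩)
termination_by ds v => (pvKeysLeft dm v, ds.length)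
decreasing_by
  · exact Prod.Lex.right _ (Nat.lt_succ_self _)
  · by_cases hk : d ∈ dm.map Prod.fst
    · exact Prod.Lex.left _ _ (pvKeysLeft_add_lt dm v d hk (by simpa using hv))
    · rw [pvGetD_nil dm d hk]
      rcases Nat.lt_or_eq_of_le (pvKeysLeft_add_le dm v d) with h | h
      · exact Prod.Lex.left _ _ h
      · rw [h]; exact Prod.Lex.right _ (Nat.succ_pos _)
  · rcases Nat.lt_or_eq_of_le (le_trans w.2 (pvKeysLeft_add_le dm v d)) with h | h
    · exact Prod.Lex.left _ _ h
    · rw [h]; exact Prod.Lex.right _ (Nat.lt_succ_self _)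

def depends_on_py (start_id : String) (target_id : String) (dep_map : List (String × List String)) (visited : Option (List String)) : Bool :=
  let v0 : PySem.Set String := match visited with
    | none => PySem.Set.ofList []        -- visited = set()
    | some l => PySem.Set.ofList l
  if PySem.Set.contains v0 start_id then false
  else (depends_on_loopA target_id dep_map ((PySem.Dict.mk dep_map).getD start_id []) (PySem.Set.add v0 start_id)).1

-- ===== PORT B =====
-- the inner `for dep_id in reversed(dep_map.get(node, []))` of Source B: check each against the target,
-- otherwise push it; none = `return True`.  Stack kept top-first: Python's append/pop at the right
-- end of the list = cons/uncons at the head of the reversed list — exact.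
def depends_on_pushB (target : String) : List String → List String → Option (List String)
  | [], st => some st
  | d :: ds, st => if d == target then none else depends_on_pushB target ds (d :: st)

theorem depends_on_pushB_some (target : String) :
    ∀ (l st st' : List String), depends_on_pushB target l st = some st' → st' = l.reverse ++ st := by
  intro l
  induction l with
  | nil => intro st st' h; simpa [depends_on_pushB] using h.symm
  | cons d ds ih =>
    intro st st' h
    simp only [depends_on_pushB] at h
    split at h
    · cases h
    · have := ih (d :: st) st' h
      simp [this]

-- Source B's while-loop over the explicit stack
def depends_on_runB (target : String) (dm : List (String × List String)) :
    (st : List String) → (v : PySem.Set String) → Bool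
  | [], _ => false
  | node :: rest, v =>
    if PySem.Set.contains v node then depends_on_runB target dm rest v
    else
      match hp : depends_on_pushB target ((PySem.Dict.mk dm).getD node []).reverse rest with
      | none => true
      | some st' => depends_on_runB target dm st' (PySem.Set.add v node)
termination_by st v => (pvKeysLeft dm v, st.length)
decreasing_by
  · exact Prod.Lex.right _ (Nat.lt_succ_self _)
  · have hst : st' = (PySem.Dict.mk dm).getD node [] ++ rest := by
      have := depends_on_pushB_some target _ rest st' hp
      simpa using this
    by_cases hk : node ∈ dm.map Prod.fst
    · exact Prod.Lex.left _ _ (pvKeysLeft_add_lt dm v node hk (by simpa using ‹¬PySem.Set.contains v node = true›))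
    · rw [hst, pvGetD_nil dm node hk]
      rcases Nat.lt_or_eq_of_le (pvKeysLeft_add_le dm v node) with h | h
      · exact Prod.Lex.left _ _ h
      · rw [h]; exact Prod.Lex.right _ (by simp)

def depends_on_py_alt (start_id : String) (target_id : String) (dep_map : List (String × List String)) (visited : Option (List String)) : Bool :=
  let v0 : PySem.Set String := match visited with
    | none => PySem.Set.ofList []        -- visited = set()
    | some l => PySem.Set.ofList l
  depends_on_runB target_id dep_map [start_id] v0

-- ===== PRECONDITION & SPEC =====
def Spec_depends_on_py (start_id : String) (target_id : String) (dep_map : List (String × List String)) (visited : Option (List String)) (out : Bool) : Prop := out = depends_on_py_alt start_id target_id dep_map visited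
instance (start_id : String) (target_id : String) (dep_map : List (String × List String)) (visited : Option (List String)) (out : Bool) : Decidable (Spec_depends_on_py start_id target_id dep_map visited out) := by unfold Spec_depends_on_py; infer_instance

-- ===== CLAIM (what is proved, stated in full; the proofs are below) =====
def Claim_equal_depends_on_py : Prop := ∀ (start_id : String) (target_id : String) (dep_map : List (String × List String)) (visited : Option (List String)), Dom_depends_on_py start_id target_id dep_map visited → Spec_depends_on_py start_id target_id dep_map visited (depends_on_py start_id target_id dep_map visited)

-- ===== LEMMAS AND PROOFS =====

theorem depends_on_pushB_none_iff (target : String) :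
    ∀ (l st : List String), depends_on_pushB target l st = none ↔ target ∈ l := by
  intro l
  induction l with
  | nil => intro st; simp [depends_on_pushB]
  | cons d ds ih =>
    intro st
    simp only [depends_on_pushB]
    split
    · next h => simp [show d = target from eq_of_beq h]
    · next h =>
      rw [ih (d :: st)]
      have hne : d ≠ target := fun he => h (by simp [he])
      simp [List.mem_cons, Ne.symm hne]

-- one recursive A-call (the body of _depends_on after the preamble), as (result, visited-after)
def depends_on_stepA (target : String) (dm : List (String × List String))
    (node : String) (v : PySem.Set String) : Bool × PySem.Set String :=
  if PySem.Set.contains v node then (false, v)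
  else ((depends_on_loopA target dm ((PySem.Dict.mk dm).getD node []) (PySem.Set.add v node)).1,
        (depends_on_loopA target dm ((PySem.Dict.mk dm).getD node []) (PySem.Set.add v node)).2.1)

-- if the target occurs in the dependency list, A's loop returns True
theorem depends_on_loopA_true (target : String) (dm : List (String × List String)) :
    ∀ (ds : List String) (v : PySem.Set String), target ∈ ds →
      (depends_on_loopA target dm ds v).1 = true := by
  intro ds
  induction ds with
  | nil => intro v h; cases h
  | cons d ds ih =>
    intro v h
    rw [depends_on_loopA]
    by_cases hd : (d == target) = true
    · simp [hd]
    · have hmem : target ∈ ds := by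
        rcases List.mem_cons.mp h with heq | h'
        · rw [heq, beq_self_eq_true] at hd; cases hd rfl
        · exact h'
      simp only [Bool.not_eq_true] at hd
      simp only [hd, Bool.false_eq_true, if_false]
      split
      · exact ih _ hmem
      · split
        · rfl
        · next w heq => simpa using ih w.1 hmem

-- the main simulation: running B's loop on (node :: stack) = running one A-call on node, then
-- B's loop on stack from the resulting visited set
def PeqStmt (target : String) (dm : List (String × List String)) (v : PySem.Set String) : Prop :=
  ∀ (node : String) (stack : List String),
    depends_on_runB target dm (node :: stack) v =
      ((depends_on_stepA target dm node v).1 ||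
        depends_on_runB target dm stack (depends_on_stepA target dm node v).2)

theorem depends_on_sim2 (target : String) (dm : List (String × List String)) (N : Nat)
    (IH : ∀ v, pvKeysLeft dm v < N → PeqStmt target dm v) :
    ∀ (ds : List String), target ∉ ds → ∀ (v : PySem.Set String) (stack : List String),
      pvKeysLeft dm v < N →
      depends_on_runB target dm (ds ++ stack) v =
        ((depends_on_loopA target dm ds v).1 ||
          depends_on_runB target dm stack (depends_on_loopA target dm ds v).2.1) := by
  intro ds
  induction ds with
  | nil => intro _ v stack _; simp [depends_on_loopA]
  | cons d ds ih =>
    intro hnot v stack hv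
    have hd : (d == target) = false := by
      simp only [beq_eq_false_iff_ne]
      intro he; exact hnot (by simp [he])
    have hnot' : target ∉ ds := fun h => hnot (List.mem_cons_of_mem _ h)
    have hL : depends_on_runB target dm (d :: (ds ++ stack)) v =
        ((depends_on_stepA target dm d v).1 ||
          depends_on_runB target dm (ds ++ stack) (depends_on_stepA target dm d v).2) :=
      IH v hv d (ds ++ stack)
    rw [List.cons_append, hL]
    rw [depends_on_loopA]
    simp only [hd, Bool.false_eq_true, if_false]
    unfold depends_on_stepA
    by_cases hc : PySem.Set.contains v d = true
    · rw [if_pos hc, dif_pos hc]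
      simp only [Bool.false_or]
      exact ih hnot' v stack hv
    · rw [if_neg hc, dif_neg hc]
      rcases heq : depends_on_loopA target dm ((PySem.Dict.mk dm).getD d []) (PySem.Set.add v d)
        with ⟨b, w⟩
      have hw : pvKeysLeft dm w.1 < N :=
        lt_of_le_of_lt (le_trans w.2 (pvKeysLeft_add_le dm v d)) hv
      cases b
      · simpa using ih hnot' w.1 stack hw
      · simp

theorem depends_on_mainstep (target : String) (dm : List (String × List String))
    (v : PySem.Set String)
    (IH : ∀ v', pvKeysLeft dm v' < pvKeysLeft dm v → PeqStmt target dm v') :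
    PeqStmt target dm v := by
  intro node stack
  unfold depends_on_stepA
  by_cases hc : PySem.Set.contains v node = true
  · rw [depends_on_runB, if_pos hc, if_pos hc]
    simp
  · rw [depends_on_runB, if_neg hc, if_neg hc]
    split
    · next hp =>
      have hmem : target ∈ (PySem.Dict.mk dm).getD node [] := by
        have := (depends_on_pushB_none_iff target _ stack).mp hp
        simpa using this
      have := depends_on_loopA_true target dm _ (PySem.Set.add v node) hmem
      simp [this]
    · next st' hp =>
      have hst : st' = (PySem.Dict.mk dm).getD node [] ++ stack := by
        have := depends_on_pushB_some target _ stack st' hp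
        simpa using this
      have hnt : target ∉ (PySem.Dict.mk dm).getD node [] := by
        intro hmem
        have : depends_on_pushB target ((PySem.Dict.mk dm).getD node []).reverse stack = none :=
          (depends_on_pushB_none_iff target _ stack).mpr (by simpa using hmem)
        rw [this] at hp; cases hp
      -- empty dependency list: handled directly, no induction hypothesis needed
      by_cases hnil : (PySem.Dict.mk dm).getD node [] = []
      · rw [hst, hnil]
        simp [depends_on_loopA]
      · have hk : node ∈ dm.map Prod.fst := by
          by_contra hk
          exact hnil (pvGetD_nil dm node hk)
        have hlt : pvKeysLeft dm (PySem.Set.add v node) < pvKeysLeft dm v :=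
          pvKeysLeft_add_lt dm v node hk (by simpa using hc)
        rw [hst]
        exact depends_on_sim2 target dm (pvKeysLeft dm v) IH _ hnt (PySem.Set.add v node) stack hlt

theorem depends_on_main (target : String) (dm : List (String × List String)) :
    ∀ (v : PySem.Set String), PeqStmt target dm v := by
  have key : ∀ (n : Nat) (v : PySem.Set String), pvKeysLeft dm v = n → PeqStmt target dm v := by
    intro n
    induction n using Nat.strong_induction_on with
    | _ n ihn =>
      intro v hv
      exact depends_on_mainstep target dm v
        (fun v' h => ihn (pvKeysLeft dm v') (hv ▸ h) v' rfl)
  exact fun v => key (pvKeysLeft dm v) v rfl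

-- the two entry bodies agree for any initial visited set
theorem depends_on_entry_eq (t : String) (dm : List (String × List String))
    (v0 : PySem.Set String) (s : String) :
    (if PySem.Set.contains v0 s = true then false
     else (depends_on_loopA t dm ((PySem.Dict.mk dm).getD s []) (PySem.Set.add v0 s)).1)
      = depends_on_runB t dm [s] v0 := by
  have hmain := depends_on_main t dm v0 s []
  rw [hmain]
  unfold depends_on_stepA
  by_cases hc : PySem.Set.contains v0 s = true
  · rw [if_pos hc, if_pos hc]
    simp [depends_on_runB]
  · rw [if_neg hc, if_neg hc]
    simp [depends_on_runB]

-- ===== VERDICT (by name: the statement is the Claim_ definition above) =====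
theorem depends_on_py_spec : Claim_equal_depends_on_py := by
  intro start_id target_id dep_map visited _
  unfold Spec_depends_on_py depends_on_py depends_on_py_alt
  cases visited with
  | none => exact depends_on_entry_eq target_id dep_map (PySem.Set.ofList []) start_id
  | some l => exact depends_on_entry_eq target_id dep_map (PySem.Set.ofList l) start_id
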